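-- pv_equiv track=rewrite | github.com/Jonax/AOC-2022 | Day01.py | IterateElves
-- ===== SOURCE A (Python) =====
-- def IterateElves(calories):
-- 	current = []
--
-- 	for value in calories:
-- 		if value == "":
-- 			if any(current):
-- 				yield current
--
-- 			current = []
-- 		else:
-- 			current.append(int(value))
--
-- 	if any(current):
-- 		yield current
-- ===== SOURCE B (Python) =====
-- def IterateElves(calories):
--     # recursively split on the first blank line instead of accumulating a running group
--     def emit(rest):
--         if not rest:
--             return
--         if "" in rest:
--             k = rest.index("")
--             head, tail = rest[:k], rest[k+1:]
--         else:
--             head, tail = rest, []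
--         g = [int(v) for v in head]
--         if any(g):
--             yield g
--         yield from emit(tail)
--     yield from emit(calories)
-- ===== Notes on version B (the rewrite author's own statement) =====
-- stated objective: alternative
-- what changed: B replaces A's single accumulator loop (append into a running group, flush on blank) by recursive splitting on the first blank line via index/slice, converting each chunk wholesale with a comprehension.
-- outside the precondition, e.g. on IterateElves(['1', 'x']): A raises ValueError, B raises ValueError
import Mathlib
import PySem

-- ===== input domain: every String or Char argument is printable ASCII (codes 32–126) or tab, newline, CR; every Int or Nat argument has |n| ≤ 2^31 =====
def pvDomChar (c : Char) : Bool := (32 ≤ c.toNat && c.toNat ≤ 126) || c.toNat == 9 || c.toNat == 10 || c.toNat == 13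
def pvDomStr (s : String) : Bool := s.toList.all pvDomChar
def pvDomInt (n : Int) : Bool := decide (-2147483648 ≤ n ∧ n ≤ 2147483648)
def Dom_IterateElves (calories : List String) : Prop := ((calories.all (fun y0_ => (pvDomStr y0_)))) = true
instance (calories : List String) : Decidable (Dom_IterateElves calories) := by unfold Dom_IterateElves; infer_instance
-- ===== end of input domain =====

-- B restructures A's accumulator loop as recursive splitting on the first blank line (objective: alternative decomposition, same cost).

-- ===== PORT A =====
-- int(value), exact per PySem; Pre_ guarantees it parses, so getD 0 is never consulted
def pvInt (v : String) : Int := (PySem.Int.ofStr? v).getD 0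
-- Python truthiness of an int (for any(current))
def pvAnyNZ (g : List Int) : Bool := g.any (fun x => x != 0)

def IterateElves (calories : List String) : List (List Int) :=
  let st := calories.foldl
    (fun (st : List (List Int) × List Int) value =>
      if value == "" then
        (if pvAnyNZ st.2 then st.1 ++ [st.2] else st.1, ([] : List Int))
      else
        (st.1, st.2 ++ [pvInt value]))
    (([] : List (List Int)), ([] : List Int))
  if pvAnyNZ st.2 then st.1 ++ [st.2] else st.1

-- ===== PORT B =====
def pvEmit (rest : List String) : List (List Int) :=
  if hrest : rest = [] then []
  else
    match h : PySem.List.index? rest "" with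
    | some k =>
        let head := PySem.List.slice rest none (some (k : Int))
        let tail := PySem.List.slice rest (some ((k : Int) + 1)) none
        let g := head.map pvInt
        (if pvAnyNZ g then [g] else []) ++ pvEmit tail
    | none =>
        let g := rest.map pvInt
        if pvAnyNZ g then [g] else []
termination_by rest.length
decreasing_by
  have h0 : 0 < rest.length := List.length_pos_iff.mpr hrest
  have := PySem.List.slice_from (xs := rest) (a := (k : Int) + 1) (by omega)
  simp only [this]
  simp only [List.length_drop]
  omega

def IterateElves_alt (calories : List String) : List (List Int) := pvEmit calories

-- ===== PRECONDITION & SPEC =====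
-- Pre_ excludes exactly the inputs where Python's int() raises ValueError on a non-blank entry.
def Pre_IterateElves (calories : List String) : Prop :=
  ∀ v ∈ calories, v ≠ "" → (PySem.Int.ofStr? v).isSome = true
instance (calories : List String) : Decidable (Pre_IterateElves calories) := by
  unfold Pre_IterateElves; infer_instance
def pvWitness_IterateElves : List String := ["1", "2", "", "0", "", "-3"]

def Spec_IterateElves (calories : List String) (out : List (List Int)) : Prop := out = IterateElves_alt calories
instance (calories : List String) (out : List (List Int)) : Decidable (Spec_IterateElves calories out) := by unfold Spec_IterateElves; infer_instance

-- ===== CLAIM (what is proved, stated in full; the proofs are below) =====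
def Claim_equal_IterateElves : Prop := ∀ (calories : List String), Dom_IterateElves calories → Pre_IterateElves calories → Spec_IterateElves calories (IterateElves calories)

-- ===== LEMMAS AND PROOFS =====

-- A's loop as structural recursion on the input with the running group as parameter
def pvGoA : List String → List Int → List (List Int)
  | [], cur => if pvAnyNZ cur then [cur] else []
  | v :: rest, cur =>
      if v = "" then (if pvAnyNZ cur then [cur] else []) ++ pvGoA rest []
      else pvGoA rest (cur ++ [pvInt v])

theorem pvFoldA (l : List String) (acc : List (List Int)) (cur : List Int) :
    (let st := l.foldl
        (fun (st : List (List Int) × List Int) value =>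
          if value == "" then
            (if pvAnyNZ st.2 then st.1 ++ [st.2] else st.1, ([] : List Int))
          else
            (st.1, st.2 ++ [pvInt value]))
        (acc, cur)
      if pvAnyNZ st.2 then st.1 ++ [st.2] else st.1) = acc ++ pvGoA l cur := by
  induction l generalizing acc cur with
  | nil => simp [pvGoA]; split_ifs <;> simp
  | cons v rest ih =>
    simp only [List.foldl_cons]
    by_cases hv : v = ""
    · subst hv
      simp only [pvGoA, BEq.rfl, if_pos]
      rw [show ((if pvAnyNZ cur then acc ++ [cur] else acc, ([] : List Int))) =
        ((if pvAnyNZ cur then acc ++ [cur] else acc), ([] : List Int)) from by split_ifs <;> rfl]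
      rw [ih]
      split_ifs <;> simp
    · have : (v == "") = false := by simp [hv]
      simp only [this, Bool.false_eq_true, if_false, pvGoA, if_neg hv]
      exact ih acc (cur ++ [pvInt v])

theorem pvIterateElves_eq_goA (l : List String) : IterateElves l = pvGoA l [] := by
  have := pvFoldA l [] []
  simpa [IterateElves] using this

-- a separator-free run flushes as a single candidate group
theorem pvGoA_no_sep (l : List String) (cur : List Int) (h : "" ∉ l) :
    pvGoA l cur = if pvAnyNZ (cur ++ l.map pvInt) then [cur ++ l.map pvInt] else [] := by
  induction l generalizing cur with
  | nil => simp [pvGoA]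
  | cons v rest ih =>
    have hv : v ≠ "" := fun hv => h (hv ▸ List.mem_cons_self)
    have hr : "" ∉ rest := fun hr => h (List.mem_cons_of_mem _ hr)
    simp only [pvGoA, if_neg hv, List.map_cons]
    rw [ih (cur ++ [pvInt v]) hr]
    simp [List.append_assoc]

-- splitting at the first separator
theorem pvGoA_split (pre tail : List String) (cur : List Int) (h : "" ∉ pre) :
    pvGoA (pre ++ "" :: tail) cur =
      (if pvAnyNZ (cur ++ pre.map pvInt) then [cur ++ pre.map pvInt] else []) ++ pvGoA tail [] := by
  induction pre generalizing cur with
  | nil => simp [pvGoA]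
  | cons v pre ih =>
    have hv : v ≠ "" := fun hv => h (hv ▸ List.mem_cons_self)
    have hp : "" ∉ pre := fun hp => h (List.mem_cons_of_mem _ hp)
    simp only [List.cons_append, pvGoA, if_neg hv, List.map_cons]
    rw [ih (cur ++ [pvInt v]) hp]
    simp [List.append_assoc]

theorem pvEmit_eq_goA (l : List String) : pvEmit l = pvGoA l [] := by
  rw [pvEmit]
  by_cases hl : l = []
  · subst hl; simp [pvGoA, pvAnyNZ]
  · simp only [dif_neg hl]
    split
    next k h =>
      obtain ⟨pre, suf, hsplit, hlen, hpre⟩ := (PySem.List.index?_eq_some_iff l "" k).mp h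
      have htake : PySem.List.slice l none (some (k : Int)) = pre := by
        rw [PySem.List.slice_to_natCast, hsplit, ← hlen, List.take_left]
      have hdrop : PySem.List.slice l (some ((k : Int) + 1)) none = suf := by
        have : ((k : Int) + 1) = ((k + 1 : Nat) : Int) := by push_cast; ring
        rw [this, PySem.List.slice_from_natCast, hsplit, ← hlen]
        show (pre ++ "" :: suf).drop (pre.length + 1) = suf
        rw [show pre.length + 1 = (pre ++ [""]).length by simp,
            show pre ++ "" :: suf = (pre ++ [""]) ++ suf by simp]
        simp
      rw [htake, hdrop, hsplit, pvGoA_split pre suf [] hpre, pvEmit_eq_goA suf]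
      simp
    next h =>
      have hmem : "" ∉ l := (PySem.List.index?_eq_none_iff l "").mp h
      rw [pvGoA_no_sep l [] hmem]
      simp
termination_by l.length
decreasing_by
  rw [hsplit]; simp; omega

-- ===== VERDICT (by name: the statement is the Claim_ definition above) =====
theorem IterateElves_spec : Claim_equal_IterateElves := by
  intro calories _ _
  unfold Spec_IterateElves IterateElves_alt
  rw [pvIterateElves_eq_goA, pvEmit_eq_goA]
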